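-- pv_equiv track=rewrite | github.com/chiishie/CodePath-work | Week4/Unit7Standard2.py | count_checked_in_passengers
-- ===== SOURCE A (Python) =====
-- def count_checked_in_passengers(rooms):
--     """
--     Return the number of passengers checked in (i.e., the count of 1s),
--     assuming rooms is sorted (all 0s followed by 1s).
--     Uses a binary search approach to find the first occurrence of 1.
--     """
--     l, r = 0, len(rooms) - 1
--     first_one = len(rooms)
--
--     while l <= r:
--         mid = l + (r - l) // 2
--         if rooms[mid] == 1:
--             first_one = mid
--             r = mid - 1
--         else:
--             l = mid + 1
--
--     return len(rooms) - first_one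
-- ===== SOURCE B (Python) =====
-- def count_checked_in_passengers(rooms):
--     """
--     Same probe sequence as the iterative binary search, but decomposed as a
--     recursion on (offset, size) sub-windows returning an Optional first-1
--     index (None if the window holds no probe hit), instead of mutable
--     l/r bounds threading a best-so-far sentinel.
--     """
--     def first_one(lo, size):
--         if size == 0:
--             return None
--         half = (size - 1) // 2
--         mid = lo + half
--         if rooms[mid] == 1:
--             found = first_one(lo, half)
--             return mid if found is None else found
--         return first_one(mid + 1, size - 1 - half)
--
--     idx = first_one(0, len(rooms))
--     return 0 if idx is None else len(rooms) - idx
-- ===== Notes on version B (the rewrite author's own statement) =====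
-- stated objective: alternative
-- what changed: The iterative binary-search loop over mutable Int bounds l/r with a best-so-far sentinel first_one=len is replaced by a recursion over (offset, size) windows of natural numbers that returns an Optional first-1 index (None when nothing was found), combined by an Option fallback instead of accumulator state.
import Mathlib
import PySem

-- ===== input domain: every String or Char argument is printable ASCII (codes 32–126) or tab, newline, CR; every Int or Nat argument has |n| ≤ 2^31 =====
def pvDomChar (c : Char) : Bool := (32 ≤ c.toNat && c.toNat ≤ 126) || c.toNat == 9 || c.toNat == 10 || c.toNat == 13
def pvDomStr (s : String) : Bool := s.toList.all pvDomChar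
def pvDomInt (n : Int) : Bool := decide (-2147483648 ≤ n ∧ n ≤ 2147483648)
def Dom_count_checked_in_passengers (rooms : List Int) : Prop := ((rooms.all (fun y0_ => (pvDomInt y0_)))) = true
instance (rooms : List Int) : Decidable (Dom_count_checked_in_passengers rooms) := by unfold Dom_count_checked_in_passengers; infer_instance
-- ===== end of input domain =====

-- B replaces the iterative best-so-far binary-search loop by a recursion on
-- (offset, size) windows returning an Optional first-1 index (alternative decomposition, same cost).


-- ===== PORT A =====
-- while-loop over state (l, r, first_one); rooms[mid] is always in range when
-- reached (0 ≤ l ≤ mid ≤ r < len), so pyGetD's default is never used.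
def pvLoopA (rooms : List Int) (l r first_one : Int) : Int :=
  if _h : l ≤ r then
    let mid := l + PySem.Int.floordiv (r - l) 2
    if PySem.List.pyGetD rooms mid 0 = 1 then
      pvLoopA rooms l (mid - 1) mid
    else
      pvLoopA rooms (mid + 1) r first_one
  else first_one
termination_by (r - l + 1).toNat
decreasing_by
  all_goals
    have h2 : PySem.Int.floordiv (r - l) 2 = (r - l) / 2 :=
      PySem.Int.floordiv_eq_ediv_of_pos (by omega)
    omega

def count_checked_in_passengers (rooms : List Int) : Int :=
  (rooms.length : Int) - pvLoopA rooms 0 ((rooms.length : Int) - 1) (rooms.length : Int)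

-- ===== PORT B =====
-- first_one over a (lo, size) window: Optional index of the first probe hit.
-- The probed index lo + (size-1)/2 is always in range at every actual call,
-- so List.getD's default is never used.
def pvFirstOne (rooms : List Int) (lo : Nat) : Nat → Option Nat
  | 0 => none
  | size + 1 =>
    let half := size / 2
    let mid := lo + half
    if rooms.getD mid 0 = 1 then
      some ((pvFirstOne rooms lo half).getD mid)
    else
      pvFirstOne rooms (mid + 1) (size - half)
termination_by s => s
decreasing_by all_goals omega

def count_checked_in_passengers_alt (rooms : List Int) : Int :=
  match pvFirstOne rooms 0 rooms.length with
  | none => 0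
  | some idx => (rooms.length : Int) - (idx : Int)

-- ===== PRECONDITION & SPEC =====
def Spec_count_checked_in_passengers (rooms : List Int) (out : Int) : Prop := out = count_checked_in_passengers_alt rooms
instance (rooms : List Int) (out : Int) : Decidable (Spec_count_checked_in_passengers rooms out) := by unfold Spec_count_checked_in_passengers; infer_instance

-- ===== CLAIM (what is proved, stated in full; the proofs are below) =====
def Claim_equal_count_checked_in_passengers : Prop := ∀ (rooms : List Int), Dom_count_checked_in_passengers rooms → Spec_count_checked_in_passengers rooms (count_checked_in_passengers rooms)

-- ===== LEMMAS AND PROOFS =====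

-- A's loop on an Int interval [l, r] computes B's window recursion at
-- (lo, size) = (l.toNat, (r + 1 - l).toNat), with the accumulator as fallback.
lemma pvLoopA_eq_firstOne (rooms : List Int) (l r f : Int) (hl : 0 ≤ l) :
    pvLoopA rooms l r f =
      (pvFirstOne rooms l.toNat (r + 1 - l).toNat).elim f (fun idx => (idx : Int)) := by
  fun_induction pvLoopA rooms l r f with
  | case1 l r f hlr mid hhit ih =>
    have hfd : PySem.Int.floordiv (r - l) 2 = (r - l) / 2 :=
      PySem.Int.floordiv_eq_ediv_of_pos (by omega)
    have hm : mid = l + (r - l) / 2 := by simp only [mid, hfd]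
    have hsz : (r + 1 - l).toNat = (r - l).toNat + 1 := by omega
    have hmid : ((l.toNat + (r - l).toNat / 2 : Nat) : Int) = mid := by push_cast; omega
    rw [hsz, pvFirstOne]
    have hget : rooms.getD (l.toNat + (r - l).toNat / 2) 0 = 1 := by
      rw [← PySem.List.pyGetD_natCast, hmid]; exact hhit
    rw [if_pos hget, ih hl]
    have harg : ((mid - 1) + 1 - l).toNat = (r - l).toNat / 2 := by omega
    have hlo : l.toNat + (r - l).toNat / 2 = mid.toNat := by omega
    rw [harg]
    cases hfo : pvFirstOne rooms l.toNat ((r - l).toNat / 2) with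
    | none => simp [hlo]; omega
    | some j => simp
  | case2 l r f hlr mid hhit ih =>
    have hfd : PySem.Int.floordiv (r - l) 2 = (r - l) / 2 :=
      PySem.Int.floordiv_eq_ediv_of_pos (by omega)
    have hm : mid = l + (r - l) / 2 := by simp only [mid, hfd]
    have hsz : (r + 1 - l).toNat = (r - l).toNat + 1 := by omega
    have hmid : ((l.toNat + (r - l).toNat / 2 : Nat) : Int) = mid := by push_cast; omega
    rw [hsz, pvFirstOne]
    have hget : ¬ rooms.getD (l.toNat + (r - l).toNat / 2) 0 = 1 := by
      rw [← PySem.List.pyGetD_natCast, hmid]; exact hhit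
    rw [if_neg hget, ih (by omega)]
    have hlo : l.toNat + (r - l).toNat / 2 + 1 = (mid + 1).toNat := by omega
    have harg : (r + 1 - (mid + 1)).toNat = (r - l).toNat - (r - l).toNat / 2 := by omega
    rw [hlo, harg]
  | case3 l r f hlr =>
    have : (r + 1 - l).toNat = 0 := by omega
    rw [this, pvFirstOne]
    rfl

-- ===== VERDICT (by name: the statement is the Claim_ definition above) =====
theorem count_checked_in_passengers_spec : Claim_equal_count_checked_in_passengers := by
  intro rooms _
  unfold Spec_count_checked_in_passengers count_checked_in_passengers count_checked_in_passengers_alt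
  rw [pvLoopA_eq_firstOne rooms 0 ((rooms.length : Int) - 1) (rooms.length : Int) le_rfl]
  have h : (((rooms.length : Int) - 1) + 1 - 0).toNat = rooms.length := by omega
  rw [h]
  simp only [Int.toNat_zero]
  cases hfo : pvFirstOne rooms 0 rooms.length with
  | none => simp
  | some idx => simp
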